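-- pv_equiv track=rewrite | github.com/miliar/Code_Jam_Webscraper | solutions_python/solutions_year16_round1_nr1/1127.py | solve
-- ===== SOURCE A (Python) =====
-- def solve(S):
--     s = S[0]
--     for c in S[1:]:
--         if c + s > s + c:
--             s = c + s
--         else:
--             s = s + c
--     return s
-- ===== SOURCE B (Python) =====
-- def solve(S):
--     # O(n): keep prepended chars in `front` (reversed) and appended chars in `back`;
--     # front[-1] is the current head, which is always the maximal char seen so far.
--     front = [S[0]]
--     back = []
--     for c in S[1:]:
--         if c >= front[-1]:
--             front.append(c)
--         else:
--             back.append(c)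
--     front.reverse()
--     return ''.join(front) + ''.join(back)
-- ===== Notes on version B (the rewrite author's own statement) =====
-- stated objective: faster
-- what changed: Replaces the quadratic rebuild-and-compare loop (each step concatenates and lexicographically compares two whole strings) by an O(n) two-list deque: prepend when c >= current head (the head is provably the maximum char), append otherwise, joining once at the end.
import Mathlib
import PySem

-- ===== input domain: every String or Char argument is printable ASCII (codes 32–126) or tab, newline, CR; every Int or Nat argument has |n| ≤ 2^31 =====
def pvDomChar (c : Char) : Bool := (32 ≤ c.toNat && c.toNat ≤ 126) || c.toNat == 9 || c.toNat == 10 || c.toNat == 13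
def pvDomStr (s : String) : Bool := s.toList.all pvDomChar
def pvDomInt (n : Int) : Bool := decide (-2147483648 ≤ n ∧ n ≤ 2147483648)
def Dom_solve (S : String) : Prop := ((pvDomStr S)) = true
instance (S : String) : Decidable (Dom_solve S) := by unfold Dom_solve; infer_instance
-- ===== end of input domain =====

-- B replaces A's quadratic concatenate-and-compare loop by an O(n) two-list deque
-- (prepend iff c >= current head); equal on all nonempty strings (A raises on "").


-- ===== PORT A =====
-- Python's `>` on equal-length strings: strict lexicographic comparison, char by char.
def pvStrLt : List Char → List Char → Bool
  | _, [] => false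
  | [], _ :: _ => true
  | a :: as, b :: bs => if a < b then true else if b < a then false else pvStrLt as bs

-- A's loop step: s = c+s if c+s > s+c else s+c
def solveStepA (s : List Char) (c : Char) : List Char :=
  if pvStrLt (s ++ [c]) (c :: s) then c :: s else s ++ [c]

def solve (S : String) : String :=
  match S.toList with
  | [] => ""        -- unreachable: Pre_solve excludes "" (Python raises IndexError on S[0])
  | c0 :: rest => String.mk (rest.foldl solveStepA [c0])

-- ===== PORT B =====
-- B's loop step: state = (front reversed, back); front[-1] is the head of frontRev.
def solveStepB (p : List Char × List Char) (c : Char) : List Char × List Char :=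
  if p.1.headD ' ' ≤ c then (c :: p.1, p.2) else (p.1, p.2 ++ [c])

def solve_alt (S : String) : String :=
  match S.toList with
  | [] => ""        -- unreachable: Pre_solve excludes ""
  | c0 :: rest =>
    let p := rest.foldl solveStepB ([c0], [])
    String.mk (p.1 ++ p.2)

-- ===== PRECONDITION & SPEC =====
-- Pre_ excludes only the empty string, on which Python A raises IndexError (S[0]).
def Pre_solve (S : String) : Prop := S ≠ ""
instance (S : String) : Decidable (Pre_solve S) := by unfold Pre_solve; infer_instance
def pvWitness_solve : String := "ba"

def Spec_solve (S : String) (out : String) : Prop := out = solve_alt S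
instance (S : String) (out : String) : Decidable (Spec_solve S out) := by unfold Spec_solve; infer_instance

-- ===== CLAIM (what is proved, stated in full; the proofs are below) =====
def Claim_equal_solve : Prop := ∀ (S : String), Dom_solve S → Pre_solve S → Spec_solve S (solve S)

-- ===== LEMMAS AND PROOFS =====

lemma pvStrLt_self (t : List Char) : pvStrLt t t = false := by
  induction t with
  | nil => rfl
  | cons a t ih => simp [pvStrLt, ih]

-- if every char of t is ≤ m, then t++[m] is ≤ m::t (strictly less, or equal as lists)
lemma aux_lt_or_eq (m : Char) (t : List Char) (h : ∀ x ∈ t, x ≤ m) :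
    pvStrLt (t ++ [m]) (m :: t) = true ∨ t ++ [m] = m :: t := by
  induction t with
  | nil => right; rfl
  | cons a t ih =>
    have ham : a ≤ m := h a (by simp)
    rcases lt_or_eq_of_le ham with hlt | heq
    · left; simp [pvStrLt, hlt]
    · subst heq
      have := ih (fun x hx => h x (by simp [hx]))
      rcases this with h1 | h2
      · left; simp [pvStrLt, h1]
      · right; simp [h2]

-- A's step, when the head m of s is maximal, is: prepend iff m ≤ c (as list values)
lemma stepA_eq (m c : Char) (t : List Char) (h : ∀ x ∈ t, x ≤ m) :
    solveStepA (m :: t) c = if m ≤ c then c :: (m :: t) else (m :: t) ++ [c] := by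
  unfold solveStepA
  simp only [List.cons_append]
  rcases lt_trichotomy c m with hcm | hcm | hcm
  · have h1 : pvStrLt (m :: (t ++ [c])) (c :: m :: t) = false := by
      simp [pvStrLt, hcm, not_lt_of_gt hcm]
    rw [h1]
    simp [not_le_of_gt hcm]
  · subst hcm
    rcases aux_lt_or_eq c t h with h1 | h2
    · have h3 : pvStrLt (c :: (t ++ [c])) (c :: c :: t) = true := by
        simp [pvStrLt, h1]
      rw [h3]
      simp
    · have h3 : pvStrLt (c :: (t ++ [c])) (c :: c :: t) = false := by
        rw [show c :: (t ++ [c]) = c :: c :: t by simp [h2], pvStrLt_self]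
      rw [h3]
      simp [h2]
  · have h1 : pvStrLt (m :: (t ++ [c])) (c :: m :: t) = true := by
      simp [pvStrLt, hcm]
    rw [h1]
    simp [le_of_lt hcm]

-- the loop invariant: A's string is frontRev ++ back, the head of frontRev bounds everything
lemma fold_eq (rest : List Char) :
    ∀ (m : Char) (f back : List Char),
      (∀ x ∈ f, x ≤ m) → (∀ x ∈ back, x ≤ m) →
      rest.foldl solveStepA ((m :: f) ++ back) =
        (rest.foldl solveStepB (m :: f, back)).1 ++ (rest.foldl solveStepB (m :: f, back)).2 := by
  induction rest with
  | nil => intro m f back _ _; rfl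
  | cons c rest ih =>
    intro m f back hf hb
    have hall : ∀ x ∈ f ++ back, x ≤ m := by
      intro x hx
      rcases List.mem_append.mp hx with h | h
      · exact hf x h
      · exact hb x h
    have hA : solveStepA ((m :: f) ++ back) c =
        if m ≤ c then c :: ((m :: f) ++ back) else ((m :: f) ++ back) ++ [c] := by
      have := stepA_eq m c (f ++ back) hall
      simpa using this
    by_cases hmc : m ≤ c
    · have hB : solveStepB (m :: f, back) c = (c :: m :: f, back) := by
        simp [solveStepB, hmc]
      simp only [List.foldl_cons, hA, hB, if_pos hmc]
      rw [show (c :: ((m :: f) ++ back)) = (c :: (m :: f)) ++ back by simp]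
      exact ih c (m :: f) back
        (by intro x hx
            rcases List.mem_cons.mp hx with h | h
            · subst h; exact hmc
            · exact le_trans (hf x h) hmc)
        (fun x hx => le_trans (hb x hx) hmc)
    · have hclt : c < m := lt_of_not_ge hmc
      have hB : solveStepB (m :: f, back) c = (m :: f, back ++ [c]) := by
        simp [solveStepB, hmc]
      simp only [List.foldl_cons, hA, hB, if_neg hmc]
      rw [show ((m :: f) ++ back) ++ [c] = (m :: f) ++ (back ++ [c]) by simp]
      exact ih m f (back ++ [c]) hf
        (by intro x hx
            rcases List.mem_append.mp hx with h | h
            · exact hb x h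
            · simp at h; subst h; exact le_of_lt hclt)

-- ===== VERDICT (by name: the statement is the Claim_ definition above) =====
theorem solve_spec : Claim_equal_solve := by
  intro S _ _
  unfold Spec_solve solve solve_alt
  cases hS : S.toList with
  | nil => rfl
  | cons c0 rest =>
    simp only []
    have := fold_eq rest c0 [] [] (by simp) (by simp)
    simpa using congrArg String.mk this
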